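-- pv_equiv track=rewrite | github.com/apple/turicreate | src/external/coremltools_wrap/coremltools/coremltools/converters/nnssa/frontend/graph_pass/type_inference.py | _bitstring_to_reverse_indices
-- ===== SOURCE A (Python) =====
-- def _bitstring_to_reverse_indices(i):
--     # returns indices in reverse order
--     indices = []
--     ctr = 0
--     if isinstance(i, list):
--         return i
--     while (i > 0):
--         if i % 2 == 1:
--             indices.append(ctr)
--         i = i // 2
--         ctr += 1
--     return indices
-- ===== SOURCE B (Python) =====
-- def _bitstring_to_reverse_indices(i):
--     # returns indices in reverse order
--     if isinstance(i, list):
--         return i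
--     rev = []
--     while i > 0:
--         h = i.bit_length() - 1   # highest set bit
--         rev.append(h)
--         i -= 1 << h              # peel it off
--     return rev[::-1]
-- ===== Notes on version B (the rewrite author's own statement) =====
-- stated objective: alternative
-- what changed: Instead of A's low-to-high divide-by-2 scan over every bit position, B repeatedly peels the highest set bit via bit_length (iterating only over set bits, most-significant first) and reverses the collected indices at the end.
import Mathlib
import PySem

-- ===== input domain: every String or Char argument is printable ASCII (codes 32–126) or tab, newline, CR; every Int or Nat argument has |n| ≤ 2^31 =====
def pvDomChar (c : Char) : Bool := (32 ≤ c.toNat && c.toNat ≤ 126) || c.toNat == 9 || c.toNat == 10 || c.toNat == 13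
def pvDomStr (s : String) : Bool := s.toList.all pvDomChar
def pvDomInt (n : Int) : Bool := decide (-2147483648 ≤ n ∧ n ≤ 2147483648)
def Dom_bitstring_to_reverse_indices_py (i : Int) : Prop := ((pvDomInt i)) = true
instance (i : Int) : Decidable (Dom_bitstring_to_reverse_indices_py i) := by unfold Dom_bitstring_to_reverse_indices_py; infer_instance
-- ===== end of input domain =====

-- B peels the HIGHEST set bit each iteration (bit_length - 1, subtract 1<<h), collecting
-- indices most-significant first, and reverses the list at the end — it iterates only over
-- set bits, in the opposite order of A's low-to-high divide-by-2 scan. Same return value.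
-- The `isinstance(i, list)` guard of the Python is vacuous here: the argument is an Int.

-- ===== PORT A =====
-- the while-loop of A: append ctr when i is odd, halve i, bump ctr
def pvALoop (i ctr : Int) : List Int :=
  if 0 < i then
    (if PySem.Int.mod i 2 = 1 then [ctr] else []) ++ pvALoop (PySem.Int.floordiv i 2) (ctr + 1)
  else []
termination_by i.toNat
decreasing_by
  rw [PySem.Int.floordiv_eq_ediv_of_pos (by omega : (0:Int) < 2)]
  omega

def bitstring_to_reverse_indices_py (i : Int) : List Int := pvALoop i 0

-- ===== PORT B =====
-- the while-loop of B: take h = bit_length(i) - 1, append h, subtract 1 << h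
def pvBLoop (i : Int) : List Int :=
  if 0 < i then
    ((PySem.Int.bitLength i : Int) - 1) ::
      pvBLoop (i - 2 ^ ((PySem.Int.bitLength i : Int) - 1).toNat)
  else []
termination_by i.toNat
decreasing_by
  have h1 : 2 ^ (PySem.Int.bitLength i - 1) ≤ i.natAbs :=
    PySem.Int.two_pow_bitLength_le i (by omega)
  have h2 : ((PySem.Int.bitLength i : Int) - 1).toNat = PySem.Int.bitLength i - 1 := by omega
  have h3 : (0:Int) < 2 ^ (PySem.Int.bitLength i - 1) := by positivity
  have h4 : ((2:Int) ^ (PySem.Int.bitLength i - 1)) = ((2 ^ (PySem.Int.bitLength i - 1) : Nat) : Int) := by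
    push_cast; ring
  rw [h2]
  omega

-- rev[::-1] ported as List.reverse (exact: slice with step -1 of a list is its reverse)
def bitstring_to_reverse_indices_py_alt (i : Int) : List Int := (pvBLoop i).reverse

-- ===== PRECONDITION & SPEC =====
def Spec_bitstring_to_reverse_indices_py (i : Int) (out : List Int) : Prop := out = bitstring_to_reverse_indices_py_alt i
instance (i : Int) (out : List Int) : Decidable (Spec_bitstring_to_reverse_indices_py i out) := by unfold Spec_bitstring_to_reverse_indices_py; infer_instance

-- ===== CLAIM (what is proved, stated in full; the proofs are below) =====
def Claim_equal_bitstring_to_reverse_indices_py : Prop := ∀ (i : Int), Dom_bitstring_to_reverse_indices_py i → Spec_bitstring_to_reverse_indices_py i (bitstring_to_reverse_indices_py i)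

-- ===== LEMMAS AND PROOFS =====

-- the common characterisation: ascending list of the set-bit positions of m
def pvBits (m : Nat) : List Int :=
  ((List.range (PySem.Int.bitLength (↑m))).filter (fun k => (m / 2 ^ k) % 2 == 1)).map
    (fun k : Nat => (k : Int))

-- A's loop on a natural number equals the filtered bit-index range, shifted by the counter
lemma pvALoop_eq (n : Nat) : ∀ m : Nat, m = n → ∀ c : Int,
    pvALoop (↑m) c =
      ((List.range (PySem.Int.bitLength (↑m))).filter (fun k => (m / 2 ^ k) % 2 == 1)).map
        (fun k : Nat => ((k : Int) + c)) := by
  induction n using Nat.strong_induction_on with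
  | _ n ih =>
    intro m hm c
    subst hm
    by_cases h : 0 < m
    · rw [pvALoop]
      have h2 : (0:Int) < (↑m : Int) := by exact_mod_cast h
      rw [if_pos h2]
      have hfd : PySem.Int.floordiv (↑m) 2 = ((m / 2 : Nat) : Int) := by
        exact_mod_cast PySem.Int.floordiv_natCast m 2
      have hmd : PySem.Int.mod (↑m) 2 = ((m % 2 : Nat) : Int) := by
        exact_mod_cast PySem.Int.mod_natCast m 2
      have hlt : m / 2 < m := Nat.div_lt_self h (by omega)
      rw [hfd, ih (m / 2) hlt (m / 2) rfl (c + 1)]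
      rw [PySem.Int.bitLength_natCast h, List.range_succ_eq_map, List.filter_cons,
        List.filter_map]
      have hhead : ((m / 2 ^ 0) % 2 == 1) = (m % 2 == 1) := by
        rw [pow_zero, Nat.div_one]
      have htail : ((fun k => (m / 2 ^ k) % 2 == 1) ∘ Nat.succ) =
          (fun k => (m / 2 / 2 ^ k) % 2 == 1) := by
        funext k
        simp only [Function.comp]
        rw [Nat.div_div_eq_div_mul, ← pow_succ']
      rw [hhead, htail]
      have hmap : ∀ (l : List Nat),
          (l.map Nat.succ).map (fun k : Nat => ((k : Int) + c)) =
            l.map (fun k : Nat => ((k : Int) + (c + 1))) := by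
        intro l
        rw [List.map_map]
        apply List.map_congr_left
        intro k _
        simp only [Function.comp, Nat.succ_eq_add_one]
        push_cast; ring
      by_cases hodd : m % 2 = 1
      · have hq : PySem.Int.mod (↑m) 2 = 1 := by rw [hmd, hodd]; rfl
        rw [if_pos hq, if_pos (by simp [hodd])]
        simp only [List.map_cons, Nat.cast_zero, zero_add, List.cons_append, List.nil_append,
          hmap]
      · have hq : ¬ PySem.Int.mod (↑m) 2 = 1 := by
          rw [hmd]; intro hc
          exact hodd (by exact_mod_cast hc)
        rw [if_neg hq, if_neg (by simp [hodd])]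
        simp only [List.nil_append, hmap]
    · have hm0 : m = 0 := by omega
      subst hm0
      rw [pvALoop]
      simp [PySem.Int.bitLength]

-- bitLength of a Nat below 2^h is at most h
lemma bitLength_le_of_lt {m h : Nat} (hm : m < 2 ^ h) : PySem.Int.bitLength (↑m) ≤ h := by
  by_cases h0 : m = 0
  · subst h0
    norm_num [PySem.Int.bitLength_zero]
  · by_contra hgt
    have h1 : 2 ^ (PySem.Int.bitLength (↑m) - 1) ≤ ((↑m : Int)).natAbs :=
      PySem.Int.two_pow_bitLength_le _ (by exact_mod_cast h0)
    have h2 : ((↑m : Int)).natAbs = m := Int.natAbs_natCast m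
    have h3 : 2 ^ h ≤ 2 ^ (PySem.Int.bitLength (↑m) - 1) :=
      Nat.pow_le_pow_right (by omega) (by omega)
    omega

-- m < 2^(bitLength m), over Nat
lemma lt_two_pow_bl (m : Nat) : m < 2 ^ PySem.Int.bitLength (↑m) := by
  have := PySem.Int.lt_two_pow_bitLength (↑m : Int)
  simpa using this

-- bitLength (2^h + r) = h + 1 when r < 2^h
lemma bl_split (h r : Nat) (hr : r < 2 ^ h) :
    PySem.Int.bitLength (↑(2 ^ h + r)) = h + 1 := by
  have hle : PySem.Int.bitLength (↑(2 ^ h + r)) ≤ h + 1 :=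
    bitLength_le_of_lt (show 2 ^ h + r < 2 ^ (h + 1) by
      have h2 : 2 ^ (h + 1) = 2 ^ h + 2 ^ h := by ring
      omega)
  have hub : 2 ^ h + r < 2 ^ PySem.Int.bitLength (↑(2 ^ h + r)) := lt_two_pow_bl _
  by_contra hne
  have hlt : PySem.Int.bitLength (↑(2 ^ h + r)) ≤ h := by omega
  have : 2 ^ PySem.Int.bitLength (↑(2 ^ h + r)) ≤ 2 ^ h :=
    Nat.pow_le_pow_right (by omega) hlt
  omega

-- splitting off the highest set bit: bits (2^h + r) = bits r ++ [h]  (r < 2^h)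
lemma pvBits_split (h r : Nat) (hr : r < 2 ^ h) :
    pvBits (2 ^ h + r) = pvBits r ++ [(h : Int)] := by
  have hblr : PySem.Int.bitLength (↑r) ≤ h := bitLength_le_of_lt hr
  unfold pvBits
  rw [bl_split h r hr, List.range_succ, List.filter_append]
  -- entries k < h: (2^h + r) / 2^k has the parity of r / 2^k
  have hcongr : (List.range h).filter (fun k => ((2 ^ h + r) / 2 ^ k) % 2 == 1) =
      (List.range h).filter (fun k => (r / 2 ^ k) % 2 == 1) := by
    apply List.filter_congr
    intro k hk
    have hk' : k < h := List.mem_range.mp hk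
    have hsplit : 2 ^ h = 2 ^ k * 2 ^ (h - k) := by
      rw [← pow_add]; congr 1; omega
    have hdiv : (2 ^ h + r) / 2 ^ k = 2 ^ (h - k) + r / 2 ^ k := by
      rw [hsplit, Nat.mul_add_div (by positivity)]
    have heven : 2 ^ (h - k) % 2 = 0 := by
      have : h - k = (h - k - 1) + 1 := by omega
      rw [this, pow_succ, Nat.mul_mod_left]
    have : ((2 ^ h + r) / 2 ^ k) % 2 = (r / 2 ^ k) % 2 := by
      rw [hdiv, Nat.add_mod, heven]
      simp
    rw [this]
  rw [hcongr]
  -- entries in [bitLength r, h): r / 2^k = 0, predicate false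
  have hzero : ∀ k, PySem.Int.bitLength (↑r) ≤ k → r / 2 ^ k = 0 := by
    intro k hkk
    apply Nat.div_eq_of_lt
    calc r < 2 ^ PySem.Int.bitLength (↑r) := lt_two_pow_bl r
    _ ≤ 2 ^ k := Nat.pow_le_pow_right (by omega) hkk
  have hrange : List.range h =
      List.range (PySem.Int.bitLength (↑r)) ++
        (List.range (h - PySem.Int.bitLength (↑r))).map (fun k => PySem.Int.bitLength (↑r) + k) := by
    rw [← List.range_add]
    congr 1
    omega
  have htrim : (List.range h).filter (fun k => (r / 2 ^ k) % 2 == 1) =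
      (List.range (PySem.Int.bitLength (↑r))).filter (fun k => (r / 2 ^ k) % 2 == 1) := by
    rw [hrange, List.filter_append]
    have : ((List.range (h - PySem.Int.bitLength (↑r))).map
        (fun k => PySem.Int.bitLength (↑r) + k)).filter (fun k => (r / 2 ^ k) % 2 == 1) = [] := by
      apply List.filter_eq_nil_iff.mpr
      intro k hk
      obtain ⟨j, _, rfl⟩ := List.mem_map.mp hk
      rw [hzero _ (by omega)]
      decide
    rw [this, List.append_nil]
  rw [htrim]
  -- the final entry k = h: (2^h + r) / 2^h = 1, predicate true
  have htop : (2 ^ h + r) / 2 ^ h = 1 := by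
    rw [Nat.add_comm, Nat.add_div_right _ (by positivity), Nat.div_eq_of_lt hr]
  have hlast : List.filter (fun k => ((2 ^ h + r) / 2 ^ k) % 2 == 1) [h] = [h] := by
    simp [List.filter, htop]
  rw [hlast, List.map_append]
  simp

-- B's loop on a natural number produces the reversed bit list
lemma pvBLoop_eq (n : Nat) : ∀ m : Nat, m = n → pvBLoop (↑m) = (pvBits m).reverse := by
  induction n using Nat.strong_induction_on with
  | _ n ih =>
    intro m hm
    subst hm
    by_cases h0 : 0 < m
    · rw [pvBLoop]
      have hpos : (0:Int) < (↑m : Int) := by exact_mod_cast h0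
      rw [if_pos hpos]
      have hbl1 : 1 ≤ PySem.Int.bitLength (↑m : Int) := by
        by_contra hc
        have hb0 : PySem.Int.bitLength (↑m : Int) = 0 := by omega
        have := lt_two_pow_bl m
        rw [hb0] at this
        omega
      set L := PySem.Int.bitLength (↑m : Int) with hL
      have htn : ((L : Int) - 1).toNat = L - 1 := by omega
      have hge : 2 ^ (L - 1) ≤ m := by
        have := PySem.Int.two_pow_bitLength_le (↑m : Int) (Int.natCast_ne_zero.mpr (by omega))
        simpa [hL] using this
      have hlt : m < 2 ^ ((L - 1) + 1) := by
        have := lt_two_pow_bl m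
        rw [← hL] at this
        have hLL : (L - 1) + 1 = L := by omega
        rw [hLL]
        exact this
      set r : Nat := m - 2 ^ (L - 1) with hrdef
      have hrlt : r < 2 ^ (L - 1) := by
        have : 2 ^ ((L-1)+1) = 2 ^ (L-1) + 2 ^ (L-1) := by ring
        omega
      have hmr : m = 2 ^ (L - 1) + r := by omega
      have harg : (↑m : Int) - 2 ^ ((L : Int) - 1).toNat = (↑r : Int) := by
        rw [htn]
        have hc : ((2 ^ (L-1) : Nat) : Int) = (2:Int) ^ (L-1) := by push_cast; ring
        omega
      have hrsmall : r < m := by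
        have h1 : 0 < 2 ^ (L - 1) := by positivity
        omega
      rw [harg, ih r hrsmall r rfl]
      rw [hmr, pvBits_split (L-1) r hrlt, List.reverse_append]
      simp
      omega
    · have : m = 0 := by omega
      subst this
      rw [pvBLoop]
      norm_num [pvBits, PySem.Int.bitLength_zero]

-- ===== VERDICT (by name: the statement is the Claim_ definition above) =====
theorem bitstring_to_reverse_indices_py_spec : Claim_equal_bitstring_to_reverse_indices_py := by
  intro i _
  unfold Spec_bitstring_to_reverse_indices_py bitstring_to_reverse_indices_py
    bitstring_to_reverse_indices_py_alt
  by_cases h : 0 < i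
  · obtain ⟨m, rfl⟩ : ∃ m : Nat, i = ↑m := ⟨i.toNat, by omega⟩
    rw [pvALoop_eq m m rfl 0, pvBLoop_eq m m rfl, List.reverse_reverse]
    simp [pvBits]
  · rw [pvALoop, if_neg h, pvBLoop, if_neg h]
    rfl
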